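-- pv_equiv track=rewrite | github.com/Komk1ll/OpenManus_SlidesMode_PV | test_image_tool.py | _determine_use_unsplash
-- ===== SOURCE A (Python) =====
-- from typing import List, Optional
--
-- def _determine_use_unsplash(slide_title: str, keywords: List[str], image_type: str) -> bool:
--     """Determine whether to use Unsplash based on slide content"""
--     if image_type:
--         # Use Unsplash for professional and general images
--         if image_type.lower() in ['professional', 'general']:
--             return True
--         # Use Tavily for technical images (more likely to find specific technical content)
--         elif image_type.lower() == 'technical':
--             return False
--
--     # Check for professional keywords
--     professional_keywords = ['business', 'professional', 'corporate', 'presentation', 'meeting']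
--     if keywords:
--         for keyword in keywords:
--             if any(prof_word in keyword.lower() for prof_word in professional_keywords):
--                 return True
--
--     # Check slide title for professional terms
--     if any(prof_word in slide_title.lower() for prof_word in professional_keywords):
--         return True
--
--     # Default to Unsplash for general use
--     return True
-- ===== SOURCE B (Python) =====
-- def _determine_use_unsplash(slide_title, keywords, image_type):
--     # Every path in the original returns True except the explicit 'technical' branch.
--     return not (image_type and image_type.lower() == 'technical')
-- ===== Notes on version B (the rewrite author's own statement) =====
-- stated objective: simpler
-- what changed: Replaces the keyword loop and title scan (whose branches all return True) with a single closed-form boolean: False iff image_type is nonempty and lowercases to 'technical'; B never touches keywords or slide_title.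
import Mathlib
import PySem

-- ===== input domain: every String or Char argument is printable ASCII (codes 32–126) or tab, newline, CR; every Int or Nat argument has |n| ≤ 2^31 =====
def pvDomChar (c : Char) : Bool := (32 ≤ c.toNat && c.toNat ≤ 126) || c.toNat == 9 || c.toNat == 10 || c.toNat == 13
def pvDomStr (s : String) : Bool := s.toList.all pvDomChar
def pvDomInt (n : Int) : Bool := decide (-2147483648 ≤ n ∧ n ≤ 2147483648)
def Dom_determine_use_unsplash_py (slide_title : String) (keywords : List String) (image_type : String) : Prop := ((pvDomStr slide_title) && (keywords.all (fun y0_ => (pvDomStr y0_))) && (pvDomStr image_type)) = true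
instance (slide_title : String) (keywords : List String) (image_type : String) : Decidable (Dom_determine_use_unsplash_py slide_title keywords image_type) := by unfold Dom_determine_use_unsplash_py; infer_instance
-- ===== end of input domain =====

-- B replaces A's keyword loop and title scan (all of whose branches return True) by one
-- closed-form boolean; objective: simpler.

-- ===== PORT A =====
def pvProfessionalKeywords : List String :=
  ["business", "professional", "corporate", "presentation", "meeting"]

-- 'any(prof_word in slide_title.lower() for prof_word in professional_keywords)' then 'return True' either way
def pvTitleCheck (slide_title : String) : Bool :=
  if pvProfessionalKeywords.any (fun p => PySem.Str.isIn p (PySem.Str.lower slide_title)) then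
    true
  else
    true

-- the 'for keyword in keywords' loop; falls through to the title check
def pvKwLoop (slide_title : String) : List String → Bool
  | [] => pvTitleCheck slide_title
  | keyword :: rest =>
    if pvProfessionalKeywords.any (fun p => PySem.Str.isIn p (PySem.Str.lower keyword)) then
      true
    else
      pvKwLoop slide_title rest

def determine_use_unsplash_py (slide_title : String) (keywords : List String) (image_type : String) : Bool :=
  if image_type ≠ "" then
    if ["professional", "general"].contains (PySem.Str.lower image_type) then
      true
    else if PySem.Str.lower image_type == "technical" then
      false
    else if keywords ≠ [] then
      pvKwLoop slide_title keywords
    else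
      pvTitleCheck slide_title
  else if keywords ≠ [] then
    pvKwLoop slide_title keywords
  else
    pvTitleCheck slide_title

-- ===== PORT B =====
def determine_use_unsplash_py_alt (slide_title : String) (keywords : List String) (image_type : String) : Bool :=
  !(image_type ≠ "" && PySem.Str.lower image_type == "technical")

-- ===== PRECONDITION & SPEC =====
def Spec_determine_use_unsplash_py (slide_title : String) (keywords : List String) (image_type : String) (out : Bool) : Prop := out = determine_use_unsplash_py_alt slide_title keywords image_type
instance (slide_title : String) (keywords : List String) (image_type : String) (out : Bool) : Decidable (Spec_determine_use_unsplash_py slide_title keywords image_type out) := by unfold Spec_determine_use_unsplash_py; infer_instance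

-- ===== CLAIM (what is proved, stated in full; the proofs are below) =====
def Claim_equal_determine_use_unsplash_py : Prop := ∀ (slide_title : String) (keywords : List String) (image_type : String), Dom_determine_use_unsplash_py slide_title keywords image_type → Spec_determine_use_unsplash_py slide_title keywords image_type (determine_use_unsplash_py slide_title keywords image_type)

-- ===== LEMMAS AND PROOFS =====
theorem pvTitleCheck_true (st : String) : pvTitleCheck st = true := by
  unfold pvTitleCheck; split_ifs <;> rfl

theorem pvKwLoop_true (st : String) (ks : List String) : pvKwLoop st ks = true := by
  induction ks with
  | nil => simp [pvKwLoop, pvTitleCheck_true]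
  | cons k rest ih => simp [pvKwLoop, ih]

-- ===== VERDICT (by name: the statement is the Claim_ definition above) =====
theorem determine_use_unsplash_py_spec : Claim_equal_determine_use_unsplash_py := by
  intro st ks it _
  unfold Spec_determine_use_unsplash_py determine_use_unsplash_py determine_use_unsplash_py_alt
  split_ifs <;>
    simp_all [pvKwLoop_true, pvTitleCheck_true] <;>
    (rename_i h; rcases h with h | h <;> simp [h])
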